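-- pv_equiv track=rewrite | github.com/DimaSamoz/agda-soas | gen/util.py | fill_underscores
-- ===== SOURCE A (Python) =====
-- def fill_underscores(s, args):
--   """Replace underscores in a string with elements of a list."""
--   l = ""
--   args.reverse()
--   for c in s:
--       if c == "_":
--           a = args.pop()
--           l += " " + a + " "
--       else:
--           l += c
--   return l.strip()
-- ===== SOURCE B (Python) =====
-- def fill_underscores(s, args):
--   """Replace underscores in a string with elements of a list."""
--   parts = s.split("_")
--   pieces = [parts[0]]
--   for a, p in zip(args, parts[1:]):
--       pieces.append(" " + a + " " + p)
--   return "".join(pieces).strip()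
-- ===== Notes on version B (the rewrite author's own statement) =====
-- stated objective: idiomatic
-- what changed: B splits the string on '_' once and joins the pieces interleaved with the arguments (zip + ''.join) instead of scanning character by character with repeated string concatenation and popping from a reversed copy of args; B also does not mutate args in place.
import Mathlib
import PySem

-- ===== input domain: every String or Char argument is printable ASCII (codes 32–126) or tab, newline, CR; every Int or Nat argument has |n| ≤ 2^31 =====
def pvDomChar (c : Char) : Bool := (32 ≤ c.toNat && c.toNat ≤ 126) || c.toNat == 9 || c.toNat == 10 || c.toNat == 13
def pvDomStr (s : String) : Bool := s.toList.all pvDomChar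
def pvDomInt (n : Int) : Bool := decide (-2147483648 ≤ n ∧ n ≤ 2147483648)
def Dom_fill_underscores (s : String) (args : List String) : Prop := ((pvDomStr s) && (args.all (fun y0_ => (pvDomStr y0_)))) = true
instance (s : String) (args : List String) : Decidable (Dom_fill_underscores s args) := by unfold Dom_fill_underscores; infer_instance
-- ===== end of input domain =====

-- B replaces A's character-by-character scan (with pop from a reversed copy of args) by split-on-'_' + zip + join;
-- the equivalence proved is about the RETURN value only: Python A mutates args in place (reverse + pop), B does not.

-- ===== PORT A =====
-- loop body of A's 'for c in s': l += … and args.pop() (pop from the end; the empty-pop IndexError is excluded by Pre_)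
def fillStepA (st : List Char × List String) (c : Char) : List Char × List String :=
  if c = '_' then
    (st.1 ++ (' ' :: (((st.2.getLast?).getD "").toList ++ [' '])), st.2.dropLast)
  else
    (st.1 ++ [c], st.2)

def fill_underscores (s : String) (args : List String) : String :=
  -- l = ""; args.reverse(); for c in s: …; return l.strip()
  String.ofList (PySem.Chars.strip (s.toList.foldl fillStepA ([], args.reverse)).1)

-- ===== PORT B =====
def fill_underscores_alt (s : String) (args : List String) : String :=
  let parts := PySem.Chars.splitOn s.toList ['_']          -- parts = s.split("_")
  let pieces := parts.headD [] ::
    (args.zip (parts.drop 1)).map (fun ap => ' ' :: (ap.1.toList ++ (' ' :: ap.2)))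
  String.ofList (PySem.Chars.strip (PySem.Chars.join [] pieces))  -- "".join(pieces).strip()

-- ===== PRECONDITION & SPEC =====
-- Pre_ excludes exactly the inputs on which A raises IndexError: more underscores in s than elements of args.
def Pre_fill_underscores (s : String) (args : List String) : Prop :=
  s.toList.count '_' ≤ args.length
instance (s : String) (args : List String) : Decidable (Pre_fill_underscores s args) := by
  unfold Pre_fill_underscores; infer_instance

def pvWitness_fill_underscores : String × List String := ("f (_ x) _", ["a", "b"])

def Spec_fill_underscores (s : String) (args : List String) (out : String) : Prop := out = fill_underscores_alt s args
instance (s : String) (args : List String) (out : String) : Decidable (Spec_fill_underscores s args out) := by unfold Spec_fill_underscores; infer_instance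

-- ===== CLAIM (what is proved, stated in full; the proofs are below) =====
def Claim_equal_fill_underscores : Prop := ∀ (s : String) (args : List String), Dom_fill_underscores s args → Pre_fill_underscores s args → Spec_fill_underscores s args (fill_underscores s args)

-- ===== LEMMAS AND PROOFS =====

-- the common interleaving both programs compute before the final strip
def fillGlue : List Char → List String → List Char
  | [], _ => []
  | c :: cs, qs =>
    if c = '_' then
      match qs with
      | q :: qs' => ' ' :: (q.toList ++ (' ' :: fillGlue cs qs'))
      | [] => ' ' :: (' ' :: fillGlue cs [])
    else c :: fillGlue cs qs

-- PySem.Chars.splitOn.go with enough fuel, characterised by List.splitOn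
lemma fill_go_spec (fuel : Nat) (l cur : List Char) (acc : List (List Char))
    (h : l.length < fuel) :
    PySem.Chars.splitOn.go ['_'] fuel l cur acc
      = acc.reverse ++ (l.splitOn '_').modifyHead (cur.reverse ++ ·) := by
  induction fuel generalizing l cur acc with
  | zero => omega
  | succ fuel ih =>
    cases l with
    | nil => simp [PySem.Chars.splitOn.go, List.splitOn]
    | cons c rest =>
      by_cases hc : c = '_'
      · subst hc
        rw [show PySem.Chars.splitOn.go ['_'] (fuel+1) ('_' :: rest) cur acc
              = PySem.Chars.splitOn.go ['_'] fuel rest [] (cur.reverse :: acc) by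
            simp [PySem.Chars.splitOn.go, List.isPrefixOf]]
        rw [ih rest [] (cur.reverse :: acc) (by simpa using h)]
        simp [List.splitOn, List.splitOnP_cons]
        cases List.splitOnP (fun x => x == '_') rest <;> simp
      · rw [show PySem.Chars.splitOn.go ['_'] (fuel+1) (c :: rest) cur acc
              = PySem.Chars.splitOn.go ['_'] fuel rest (c :: cur) acc by
            simp [PySem.Chars.splitOn.go, List.isPrefixOf, Ne.symm hc]]
        rw [ih rest (c :: cur) acc (by simpa using h)]
        simp [List.splitOn, List.splitOnP_cons, hc]
        cases hsp : List.splitOnP (fun b => b == '_') rest with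
        | nil => exact absurd hsp (List.splitOnP_ne_nil _ rest)
        | cons hd tl => simp

lemma fill_splitOn_eq (cs : List Char) :
    PySem.Chars.splitOn cs ['_'] = cs.splitOn '_' := by
  rw [PySem.Chars.splitOn, fill_go_spec (cs.length + 1) cs [] [] (by omega)]
  cases hsp : cs.splitOn '_' with
  | nil => exact absurd hsp (by simp [List.splitOn]; exact List.splitOnP_ne_nil _ cs)
  | cons hd tl => simp

lemma fill_join_nil (ps : List (List Char)) :
    PySem.Chars.join [] ps = ps.flatten := by
  induction ps with
  | nil => rfl
  | cons p ps ih =>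
    cases ps with
    | nil => simp [PySem.Chars.join, List.intercalate]
    | cons q ps' =>
      simp only [PySem.Chars.join, List.intercalate] at ih ⊢
      simp [List.intersperse] at ih ⊢
      exact ih

-- A's loop computes fillGlue (args are consumed from the front of the original list)
lemma fillA_loop (cs : List Char) (qs : List String) (acc : List Char)
    (h : cs.count '_' ≤ qs.length) :
    (cs.foldl fillStepA (acc, qs.reverse)).1 = acc ++ fillGlue cs qs := by
  induction cs generalizing qs acc with
  | nil => simp [fillGlue]
  | cons c cs ih =>
    by_cases hc : c = '_'
    · subst hc
      cases qs with
      | nil => simp at h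
      | cons q qs' =>
        rw [List.foldl_cons,
            show fillStepA (acc, (q :: qs').reverse) '_'
              = (acc ++ (' ' :: (q.toList ++ [' '])), qs'.reverse) by
              simp [fillStepA, List.getLast?_reverse]]
        rw [ih qs' _ (by simp at h; omega)]
        simp [fillGlue]
    · rw [List.foldl_cons,
          show fillStepA (acc, qs.reverse) c = (acc ++ [c], qs.reverse) by
            simp [fillStepA, hc]]
      rw [ih qs _ (by simp [hc] at h ⊢; omega)]
      simp [fillGlue, hc]

-- B's split/zip/join computes the same fillGlue
lemma fillB_join (cs : List Char) (qs : List String)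
    (h : cs.count '_' ≤ qs.length) :
    ((cs.splitOn '_').headD [] ::
      (qs.zip ((cs.splitOn '_').drop 1)).map
        (fun ap => ' ' :: (ap.1.toList ++ (' ' :: ap.2)))).flatten
      = fillGlue cs qs := by
  induction cs generalizing qs with
  | nil => simp [List.splitOn, fillGlue]
  | cons c cs ih =>
    by_cases hc : c = '_'
    · subst hc
      cases qs with
      | nil => simp at h
      | cons q qs' =>
        have h' : cs.count '_' ≤ qs'.length := by simp at h; omega
        rw [show ('_' :: cs).splitOn '_' = [] :: cs.splitOn '_' by
              simp [List.splitOn, List.splitOnP_cons]]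
        cases hsp : cs.splitOn '_' with
        | nil => exact absurd hsp (by simp [List.splitOn]; exact List.splitOnP_ne_nil _ cs)
        | cons hd tl =>
          have := ih qs' h'
          rw [hsp] at this
          simp only [List.headD, List.drop, List.zip_cons_cons, List.map_cons,
            List.flatten_cons] at this ⊢
          simp [fillGlue, ← this]
    · have h' : cs.count '_' ≤ qs.length := by
        simp [hc] at h ⊢; omega
      rw [show (c :: cs).splitOn '_' = (cs.splitOn '_').modifyHead (c :: ·) by
            simp [List.splitOn, List.splitOnP_cons, hc]]
      cases hsp : cs.splitOn '_' with
      | nil => exact absurd hsp (by simp [List.splitOn]; exact List.splitOnP_ne_nil _ cs)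
      | cons hd tl =>
        have := ih qs h'
        rw [hsp] at this
        simp only [List.headD, List.drop, List.modifyHead] at this ⊢
        simp [fillGlue, hc, ← this]

-- ===== VERDICT (by name: the statement is the Claim_ definition above) =====
theorem fill_underscores_spec : Claim_equal_fill_underscores := by
  intro s args _hdom hpre
  unfold Spec_fill_underscores fill_underscores fill_underscores_alt
  simp only [fill_splitOn_eq, fill_join_nil]
  rw [fillA_loop s.toList args [] hpre, fillB_join s.toList args hpre]
  simp
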